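-- pv_equiv track=rewrite | github.com/kolleeee/kolle1 | WEB指纹扫描FILE_MD5/v2.0服务器URL采集CMS识别MYSQL版本/xx_com_cn_xx.py | get_sdomain
-- ===== SOURCE A (Python) =====
-- suffixes = 'ac','ad','ae','aero','af','ag','ai','al','am','an','ao','aq','ar','arpa','as',\
--            'asia','at','au','aw','ax','az','ba', 'bb','bd','be','bf','bg','bh','bi','biz',\
--            'bj','bm','bn','bo','br','bs','bt','bv','bw','by','bz','ca','cat','cc','cd','cf',\
--            'cg','ch','ci','ck','cl','cm','cn','co','com','coop','cr','cu','cv','cx','cy',\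
--            'cz','de','dj','dk','dm','do','dz','ec','edu','ee','eg','er','es','et','eu','fi',\
--            'fj','fk','fm','fo','fr','ga','gb','gd','ge','gf','gg','gh','gi','gl','gm','gn',\
--            'gov','gp','gq','gr','gs','gt','gu','gw','gy','hk','hm','hn','hr','ht','hu','id',\
--            'ie','il','im','in','info','int','io','iq','ir','is','it','je','jm','jo','jobs',\
--            'jp','ke','kg','kh','ki','km','kn','kp','kr','kw','ky','kz','la','lb','lc','li',\
--            'lk','lr','ls','lt','lu','lv','ly','ma','mc','md','me','mg','mh','mil','mk','ml',\
--            'mm','mn','mo','mobi','mp','mq','mr','ms','mt','mu','mv','mw','mx','my','mz','na',\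
--            'name','nc','ne','net','nf','ng','ni','nl','no','np','nr','nu','nz','om','org','pa',\
--            'pe','pf','pg','ph','pk','pl','pm','pn','pr','pro','ps','pt','pw','py','qa','re','ro',\
--            'rs','ru','rw','sa','sb','sc','sd','se','sg','sh','si','sj','sk','sl','sm','sn','so',\
--            'sr','st','su','sv','sy','sz','tc','td','tel','tf','tg','th','tj','tk','tl','tm','tn',\
--            'to','tp','tr','tt','tv','tw','tz','ua','ug','uk','us','uy','uz','va','vc','ve','vg',\
--            'vi','vn','vu','wf','ws','xn','ye','yt','za','zm','zw'
--
-- def get_sdomain(domain):  #域名拆解www.baidu.com->baidu.com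
--     try:
--         sdomain = []
--         bdomain = False
--         for section in domain.split('.'):
--             if section in suffixes:
--                 sdomain.append(section)
--                 bdomain = True
--             else:
--                 sdomain = [section]
--         return '.'.join(sdomain) if bdomain  else ''
--     except:
--         return 0
-- ===== SOURCE B (Python) =====
-- _SUFFIX_SET = set(
--     "ac ad ae aero af ag ai al am an ao aq ar arpa as asia at au aw ax az ba bb bd be bf bg".split()
--     + "bh bi biz bj bm bn bo br bs bt bv bw by bz ca cat cc cd cf cg ch ci ck cl cm cn co".split()
--     + "com coop cr cu cv cx cy cz de dj dk dm do dz ec edu ee eg er es et eu fi fj fk fm fo".split()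
--     + "fr ga gb gd ge gf gg gh gi gl gm gn gov gp gq gr gs gt gu gw gy hk hm hn hr ht hu".split()
--     + "id ie il im in info int io iq ir is it je jm jo jobs jp ke kg kh ki km kn kp kr kw ky".split()
--     + "kz la lb lc li lk lr ls lt lu lv ly ma mc md me mg mh mil mk ml mm mn mo mobi mp mq".split()
--     + "mr ms mt mu mv mw mx my mz na name nc ne net nf ng ni nl no np nr nu nz om org pa pe".split()
--     + "pf pg ph pk pl pm pn pr pro ps pt pw py qa re ro rs ru rw sa sb sc sd se sg sh si".split()
--     + "sj sk sl sm sn so sr st su sv sy sz tc td tel tf tg th tj tk tl tm tn to tp tr tt".split()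
--     + "tv tw tz ua ug uk us uy uz va vc ve vg vi vn vu wf ws xn ye yt za zm zw".split()
-- )
--
--
-- def get_sdomain(domain):  # last-non-suffix index + any-suffix gate + one slice
--     try:
--         parts = domain.split('.')
--         keep = 0
--         for i, label in enumerate(parts):
--             if label not in _SUFFIX_SET:
--                 keep = i
--         if any(label in _SUFFIX_SET for label in parts):
--             return '.'.join(parts[keep:])
--         return ''
--     except:
--         return 0
-- ===== Notes on version B (the rewrite author's own statement) =====
-- stated objective: simpler
-- what changed: Replaces A's reset-and-accumulate (sdomain, bdomain) loop by a last-non-suffix-index pass over enumerate(parts), an any-suffix gate, and a single slice parts[keep:], with the suffixes held in a set built from split word strings.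
import Mathlib
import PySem

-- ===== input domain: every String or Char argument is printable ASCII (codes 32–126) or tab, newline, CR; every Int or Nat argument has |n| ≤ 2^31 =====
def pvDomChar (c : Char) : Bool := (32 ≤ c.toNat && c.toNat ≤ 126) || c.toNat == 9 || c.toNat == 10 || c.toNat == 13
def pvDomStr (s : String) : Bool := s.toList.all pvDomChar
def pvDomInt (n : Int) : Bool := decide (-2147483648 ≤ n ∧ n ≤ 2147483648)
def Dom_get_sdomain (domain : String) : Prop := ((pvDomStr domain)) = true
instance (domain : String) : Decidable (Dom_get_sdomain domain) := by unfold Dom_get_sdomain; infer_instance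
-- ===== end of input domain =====

-- B replaces A's reset-and-accumulate loop state by a last-non-suffix-index find, an any-suffix
-- gate and one slice, with the suffixes kept as a set built from split word strings;
-- same return value, objective: simpler decomposition (no speed claim).

-- ===== PORT A =====
-- the module constant 'suffixes' (tuple of strings) as A uses it
def suffixesList : List String := ["ac", "ad", "ae", "aero", "af", "ag", "ai", "al", "am", "an", "ao", "aq", "ar", "arpa", "as", "asia", "at", "au", "aw", "ax", "az", "ba", "bb", "bd", "be", "bf", "bg", "bh", "bi", "biz", "bj", "bm", "bn", "bo", "br", "bs", "bt", "bv", "bw", "by", "bz", "ca", "cat", "cc", "cd", "cf", "cg", "ch", "ci", "ck", "cl", "cm", "cn", "co", "com", "coop", "cr", "cu", "cv", "cx", "cy", "cz", "de", "dj", "dk", "dm", "do", "dz", "ec", "edu", "ee", "eg", "er", "es", "et", "eu", "fi", "fj", "fk", "fm", "fo", "fr", "ga", "gb", "gd", "ge", "gf", "gg", "gh", "gi", "gl", "gm", "gn", "gov", "gp", "gq", "gr", "gs", "gt", "gu", "gw", "gy", "hk", "hm", "hn", "hr", "ht", "hu", "id", "ie", "il", "im", "in", "info", "int", "io", "iq",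 "ir", "is", "it", "je", "jm", "jo", "jobs", "jp", "ke", "kg", "kh", "ki", "km", "kn", "kp", "kr", "kw", "ky", "kz", "la", "lb", "lc", "li", "lk", "lr", "ls", "lt", "lu", "lv", "ly", "ma", "mc", "md", "me", "mg", "mh", "mil", "mk", "ml", "mm", "mn", "mo", "mobi", "mp", "mq", "mr", "ms", "mt", "mu", "mv", "mw", "mx", "my", "mz", "na", "name", "nc", "ne", "net", "nf", "ng", "ni", "nl", "no", "np", "nr", "nu", "nz", "om", "org", "pa", "pe", "pf", "pg", "ph", "pk", "pl", "pm", "pn", "pr", "pro", "ps", "pt", "pw", "py", "qa", "re", "ro", "rs", "ru", "rw", "sa", "sb", "sc", "sd", "se", "sg", "sh", "si", "sj", "sk", "sl", "sm", "sn", "so", "sr", "st", "su", "sv", "sy", "sz", "tc", "td", "tel", "tf", "tg", "th", "tj", "tk", "tl", "tm", "tn", "to", "tp", "tr", "tt", "tv", "tw", "tz", "ua", "ug", "uk", "us", "uy", "uz", "va", "vc", "ve", "vg", "vi", "vn", "vu", "wf", "ws", "xn", "ye", "yt", "za", "zm", "zw"]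

-- A's 'section in suffixes': membership in the tuple
def pvIsSuffix (p : String) : Bool := decide (p ∈ suffixesList)

-- A's loop body: append-and-latch on a suffix label, reset sdomain otherwise
def pvStepA (st : List String × Bool) (sec : String) : List String × Bool :=
  if pvIsSuffix sec then (st.1 ++ [sec], true) else ([sec], st.2)

def get_sdomain (domain : String) : String :=
  -- domain.split('.'): sep "." is nonempty, so split? is always some; getD only totalizes
  let r := ((PySem.Str.split? domain ".").getD []).foldl pvStepA ([], false)
  if r.2 then PySem.Str.join "." r.1 else ""
-- (A's 'except: return 0' is dead code: no operation in the try block raises on a str input)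

-- ===== PORT B =====
-- B's module constant: _SUFFIX_SET = set("…".split() + "…".split() + …)
def pvSuffixSet : PySem.Set String :=
  PySem.Set.ofList
    (PySem.Str.split₀ "ac ad ae aero af ag ai al am an ao aq ar arpa as asia at au aw ax az ba bb bd be bf bg" ++ PySem.Str.split₀ "bh bi biz bj bm bn bo br bs bt bv bw by bz ca cat cc cd cf cg ch ci ck cl cm cn co" ++ PySem.Str.split₀ "com coop cr cu cv cx cy cz de dj dk dm do dz ec edu ee eg er es et eu fi fj fk fm fo" ++ PySem.Str.split₀ "fr ga gb gd ge gf gg gh gi gl gm gn gov gp gq gr gs gt gu gw gy hk hm hn hr ht hu" ++ PySem.Str.split₀ "id ie il im in info int io iq ir is it je jm jo jobs jp ke kg kh ki km kn kp kr kw ky" ++ PySem.Str.split₀ "kz la lb lc li lk lr ls lt lu lv ly ma mc md me mg mh mil mk ml mm mn mo mobi mp mq" ++ PySem.Str.split₀ "mr ms mt mu mv mw mx my mz na name nc ne net nf ng ni nl no np nr nu nz om org pa pe" ++ PySem.Str.split₀ "pf pg ph pk pl pm pn pr pro ps pt pw py qa re ro rs ru rw sa sb sc sd se sg sh si" ++ PySem.Str.split₀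 "sj sk sl sm sn so sr st su sv sy sz tc td tel tf tg th tj tk tl tm tn to tp tr tt" ++ PySem.Str.split₀ "tv tw tz ua ug uk us uy uz va vc ve vg vi vn vu wf ws xn ye yt za zm zw")

-- B's 'label in _SUFFIX_SET'
def pvInSet (p : String) : Bool := PySem.Set.contains pvSuffixSet p

-- B's loop body: remember the index of the last label that is not in the set
def pvStepB (acc : Int) (ip : Int × String) : Int :=
  if pvInSet ip.2 then acc else ip.1

def get_sdomain_alt (domain : String) : String :=
  -- domain.split('.'): sep "." is nonempty, so split? is always some; getD only totalizes
  let parts := (PySem.Str.split? domain ".").getD []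
  let keep := (PySem.List.enumerate parts).foldl pvStepB 0
  if parts.any pvInSet then
    -- parts[keep:] with 0 ≤ keep: a nonnegative Python slice-from is List.drop
    PySem.Str.join "." (parts.drop keep.toNat)
  else ""

-- ===== PRECONDITION & SPEC =====
def Spec_get_sdomain (domain : String) (out : String) : Prop := out = get_sdomain_alt domain
instance (domain : String) (out : String) : Decidable (Spec_get_sdomain domain out) := by unfold Spec_get_sdomain; infer_instance

-- ===== CLAIM (what is proved, stated in full; the proofs are below) =====
def Claim_equal_get_sdomain : Prop := ∀ (domain : String), Dom_get_sdomain domain → Spec_get_sdomain domain (get_sdomain domain)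

-- ===== LEMMAS AND PROOFS =====
-- B's set membership agrees with A's tuple membership
set_option maxRecDepth 100000 in
set_option maxHeartbeats 2000000 in
theorem pvWords : PySem.Str.split₀ "ac ad ae aero af ag ai al am an ao aq ar arpa as asia at au aw ax az ba bb bd be bf bg" ++ PySem.Str.split₀ "bh bi biz bj bm bn bo br bs bt bv bw by bz ca cat cc cd cf cg ch ci ck cl cm cn co" ++ PySem.Str.split₀ "com coop cr cu cv cx cy cz de dj dk dm do dz ec edu ee eg er es et eu fi fj fk fm fo" ++ PySem.Str.split₀ "fr ga gb gd ge gf gg gh gi gl gm gn gov gp gq gr gs gt gu gw gy hk hm hn hr ht hu" ++ PySem.Str.split₀ "id ie il im in info int io iq ir is it je jm jo jobs jp ke kg kh ki km kn kp kr kw ky" ++ PySem.Str.split₀ "kz la lb lc li lk lr ls lt lu lv ly ma mc md me mg mh mil mk ml mm mn mo mobi mp mq" ++ PySem.Str.split₀ "mr ms mt mu mv mw mx my mz na name nc ne net nf ng ni nl no np nr nu nz om org pa pe" ++ PySem.Str.split₀ "pf pg ph pk pl pm pn pr pro ps pt pw py qa re ro rs ru rw sa sb sc sd se sg sh si" ++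 PySem.Str.split₀ "sj sk sl sm sn so sr st su sv sy sz tc td tel tf tg th tj tk tl tm tn to tp tr tt" ++ PySem.Str.split₀ "tv tw tz ua ug uk us uy uz va vc ve vg vi vn vu wf ws xn ye yt za zm zw" = suffixesList := by decide

theorem pvInSet_eq : pvInSet = pvIsSuffix := by
  funext p
  simp only [pvInSet, pvIsSuffix, pvSuffixSet, pvWords]
  by_cases h : p ∈ suffixesList <;>
    simp [PySem.Set.mem_ofList, h]

-- Invariant relating A's fold state to B's last-non-suffix-index fold, for any start index k:
-- the latched flag equals b || any-suffix; on an all-suffix list A appends and B keeps its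
-- accumulator; otherwise B's index j lies in [k, k+len) and A's sdomain is the drop at j-k.
theorem pvKey (ps : List String) : ∀ (k j0 : Int) (s : List String) (b : Bool),
    ((ps.foldl pvStepA (s, b)).2 = (b || ps.any pvIsSuffix))
    ∧ (if ps.all pvIsSuffix then
         ((PySem.List.enumerate ps k).foldl pvStepB j0 = j0
           ∧ (ps.foldl pvStepA (s, b)).1 = s ++ ps)
       else
         (k ≤ (PySem.List.enumerate ps k).foldl pvStepB j0
           ∧ (PySem.List.enumerate ps k).foldl pvStepB j0 < k + ps.length
           ∧ (ps.foldl pvStepA (s, b)).1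
               = ps.drop ((PySem.List.enumerate ps k).foldl pvStepB j0 - k).toNat)) := by
  induction ps with
  | nil => intro k j0 s b; simp [PySem.List.enumerate]
  | cons p rest ih =>
    intro k j0 s b
    rw [PySem.List.enumerate_cons]
    simp only [List.foldl_cons, List.any_cons, List.all_cons, pvStepA, pvStepB, pvInSet_eq]
    by_cases hp : pvIsSuffix p = true
    · simp only [hp, if_true, Bool.true_or, Bool.true_and]
      have H1 := (ih (k + 1) j0 (s ++ [p]) true).1
      have H2 := (ih (k + 1) j0 (s ++ [p]) true).2
      refine ⟨by rw [H1]; simp, ?_⟩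
      by_cases ha : rest.all pvIsSuffix = true
      · rw [if_pos ha] at H2 ⊢
        exact ⟨H2.1, by rw [H2.2]; simp⟩
      · rw [if_neg ha] at H2 ⊢
        obtain ⟨h1, h2, h3⟩ := H2
        refine ⟨by omega, by push_cast [List.length_cons] at h2 ⊢; omega, ?_⟩
        rw [h3]
        have hh : ((PySem.List.enumerate rest (k + 1)).foldl pvStepB j0 - k).toNat
            = ((PySem.List.enumerate rest (k + 1)).foldl pvStepB j0 - (k + 1)).toNat + 1 := by
          omega
        rw [hh, List.drop_succ_cons]
    · rw [Bool.not_eq_true] at hp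
      simp only [hp, Bool.false_eq_true, if_false, Bool.false_or, Bool.false_and,
        Bool.false_eq_true, if_false]
      have H1 := (ih (k + 1) k [p] b).1
      have H2 := (ih (k + 1) k [p] b).2
      refine ⟨by rw [H1], ?_⟩
      by_cases ha : rest.all pvIsSuffix = true
      · rw [if_pos ha] at H2
        obtain ⟨hj, hs⟩ := H2
        refine ⟨by omega, by push_cast [List.length_cons]; omega, ?_⟩
        rw [hs, hj]
        simp
      · rw [if_neg ha] at H2
        obtain ⟨h1, h2, h3⟩ := H2
        refine ⟨by omega, by push_cast [List.length_cons] at h2 ⊢; omega, ?_⟩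
        rw [h3]
        have hh : ((PySem.List.enumerate rest (k + 1)).foldl pvStepB k - k).toNat
            = ((PySem.List.enumerate rest (k + 1)).foldl pvStepB k - (k + 1)).toNat + 1 := by
          omega
        rw [hh, List.drop_succ_cons]

-- ===== VERDICT (by name: the statement is the Claim_ definition above) =====
theorem get_sdomain_spec : Claim_equal_get_sdomain := by
  intro domain _
  unfold Spec_get_sdomain get_sdomain get_sdomain_alt
  obtain ⟨H2, H1⟩ := pvKey ((PySem.Str.split? domain ".").getD []) 0 0 [] false
  simp only [Bool.false_or] at H2
  simp only [pvInSet_eq]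
  by_cases ha : ((PySem.Str.split? domain ".").getD []).all pvIsSuffix = true
  · rw [if_pos ha] at H1
    obtain ⟨hj, hs⟩ := H1
    simp only [H2, hj, hs, List.nil_append, Int.toNat_zero, List.drop_zero]
  · rw [if_neg ha] at H1
    obtain ⟨h1, h2, hs⟩ := H1
    simp only [H2, hs, Int.sub_zero]
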